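-- pv_equiv track=rewrite | github.com/tylerbittner/learning | Google Foobar/Task 2.2 - En Route Salute (pair matching in string)/solution.py | answer
-- ===== SOURCE A (Python) =====
-- def answer(s):
--     """Return total number of en route salutes in string!"""
--
--     left_count = 0
--     salute_count = 0
--
--     for char in s:
--         if char == '>':
--             left_count += 1
--         if char == '<':
--             salute_count += left_count * 2
--
--     return salute_count
-- ===== SOURCE B (Python) =====
-- def answer(s):
--     """Return total number of en route salutes in string!"""
--     total = 0
--     for i in range(len(s)):
--         if s[i] == '<':
--             c = 0
--             for j in range(i):
--                 if s[j] == '>':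
--                     c += 1
--             total += 2 * c
--     return total
-- ===== Notes on version B (the rewrite author's own statement) =====
-- stated objective: alternative
-- what changed: Replaces the single running accumulator of right-walkers with a per-salute rescan: for each left-walker at position i an inner loop recounts the right-walkers in the prefix before i and adds twice that count.
import Mathlib
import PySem

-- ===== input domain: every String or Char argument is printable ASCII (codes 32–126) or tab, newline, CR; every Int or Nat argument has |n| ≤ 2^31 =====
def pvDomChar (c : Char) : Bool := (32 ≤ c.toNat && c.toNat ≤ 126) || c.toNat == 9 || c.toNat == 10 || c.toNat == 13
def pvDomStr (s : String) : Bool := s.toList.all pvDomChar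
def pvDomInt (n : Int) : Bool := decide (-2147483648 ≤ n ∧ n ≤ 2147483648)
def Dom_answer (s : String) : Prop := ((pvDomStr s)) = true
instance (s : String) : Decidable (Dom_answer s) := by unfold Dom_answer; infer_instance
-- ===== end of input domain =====

-- B replaces A's running '>' accumulator by a per-'<' rescan of the prefix (alternative decomposition, same results).

-- ===== PORT A =====
-- the for-loop over s with state (left_count, salute_count)
def answerLoop : List Char → Int → Int → Int
  | [], _, saluteCount => saluteCount
  | c :: t, leftCount, saluteCount =>
    let leftCount' := if c = '>' then leftCount + 1 else leftCount
    let saluteCount' := if c = '<' then saluteCount + leftCount' * 2 else saluteCount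
    answerLoop t leftCount' saluteCount'

def answer (s : String) : Int := answerLoop s.toList 0 0

-- ===== PORT B =====
-- the inner loop: count '>' in the prefix s[:i] (rescanned for every '<')
def countGt : List Char → Int
  | [] => 0
  | c :: t => (if c = '>' then 1 else 0) + countGt t

-- the outer loop: pre is the already-seen prefix s[:i], rest the remainder
def answerAltLoop : List Char → List Char → Int → Int
  | _, [], total => total
  | pre, c :: t, total =>
    answerAltLoop (pre ++ [c]) t (if c = '<' then total + 2 * countGt pre else total)

def answer_alt (s : String) : Int := answerAltLoop [] s.toList 0

-- ===== PRECONDITION & SPEC =====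
def Spec_answer (s : String) (out : Int) : Prop := out = answer_alt s
instance (s : String) (out : Int) : Decidable (Spec_answer s out) := by unfold Spec_answer; infer_instance

-- ===== CLAIM (what is proved, stated in full; the proofs are below) =====
def Claim_equal_answer : Prop := ∀ (s : String), Dom_answer s → Spec_answer s (answer s)

-- ===== LEMMAS AND PROOFS =====
theorem countGt_append (l m : List Char) : countGt (l ++ m) = countGt l + countGt m := by
  induction l with
  | nil => simp [countGt]
  | cons c t ih => simp [countGt, ih]; ring

theorem loop_eq (rest : List Char) : ∀ (pre : List Char) (sc : Int),
    answerLoop rest (countGt pre) sc = answerAltLoop pre rest sc := by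
  induction rest with
  | nil => intro pre sc; rfl
  | cons c t ih =>
    intro pre sc
    simp only [answerLoop, answerAltLoop]
    have h : (if c = '>' then countGt pre + 1 else countGt pre) = countGt (pre ++ [c]) := by
      simp [countGt_append, countGt]
      split_ifs <;> ring
    rw [h]
    by_cases hc : c = '<'
    · subst hc
      simp only [if_pos rfl]
      rw [← ih]
      have h2 : countGt (pre ++ ['<']) = countGt pre := by simp [countGt_append, countGt]
      rw [h2]
      congr 1
      ring_nf
    · simp only [if_neg hc]
      exact ih _ _

-- ===== VERDICT (by name: the statement is the Claim_ definition above) =====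
theorem answer_spec : Claim_equal_answer := by
  intro s _
  unfold Spec_answer answer answer_alt
  have := loop_eq s.toList [] 0
  simpa [countGt] using this
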